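-- pv_equiv track=rewrite | github.com/snesrev/zelda3 | other/make_text_dict.py | find_all_ngrams
-- ===== SOURCE A (Python) =====
-- import collections
--
-- def find_all_ngrams(lines, N, cost):
--   ctr = collections.Counter()
--   for line in lines:
--     for i in range(len(line) - N + 1):
--       if line[i] != line[i+1]:
--         ctr[tuple(line[i:i+N])] += 1
--   r = list((b, a) for a, b in ctr.items() if b >= 2)
--   if len(r) == 0:
--     return None, 0
--   b, a = max(r)
--   return a, (N - cost) * b - N - 2 # 2 is the overhead of the dict
-- ===== SOURCE B (Python) =====
-- def find_all_ngrams(lines, N, cost):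
--   # Sort-and-scan: flatten all valid n-grams, sort them, then run-length scan
--   # the sorted list, keeping the best (count, gram) pair among runs of length >= 2.
--   grams = sorted(tuple(line[i:i+N])
--                  for line in lines
--                  for i in range(len(line) - N + 1)
--                  if line[i] != line[i+1])
--   best = None
--   j = 0
--   n = len(grams)
--   while j < n:
--     k = j + 1
--     while k < n and grams[k] == grams[j]:
--       k += 1
--     c = k - j
--     if c >= 2 and (best is None or best < (c, grams[j])):
--       best = (c, grams[j])
--     j = k
--   if best is None:
--     return None, 0
--   c, g = best
--   return g, (N - cost) * c - N - 2
-- ===== Notes on version B (the rewrite author's own statement) =====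
-- stated objective: alternative
-- what changed: Replaces A's hash-based Counter and the max() over its filtered items by a sort-and-scan algorithm: all valid n-grams are flattened into one list, sorted, and a single run-length pass over the sorted list computes each distinct gram's count and keeps the running best (count, gram) pair among runs of length >= 2.
import Mathlib
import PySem

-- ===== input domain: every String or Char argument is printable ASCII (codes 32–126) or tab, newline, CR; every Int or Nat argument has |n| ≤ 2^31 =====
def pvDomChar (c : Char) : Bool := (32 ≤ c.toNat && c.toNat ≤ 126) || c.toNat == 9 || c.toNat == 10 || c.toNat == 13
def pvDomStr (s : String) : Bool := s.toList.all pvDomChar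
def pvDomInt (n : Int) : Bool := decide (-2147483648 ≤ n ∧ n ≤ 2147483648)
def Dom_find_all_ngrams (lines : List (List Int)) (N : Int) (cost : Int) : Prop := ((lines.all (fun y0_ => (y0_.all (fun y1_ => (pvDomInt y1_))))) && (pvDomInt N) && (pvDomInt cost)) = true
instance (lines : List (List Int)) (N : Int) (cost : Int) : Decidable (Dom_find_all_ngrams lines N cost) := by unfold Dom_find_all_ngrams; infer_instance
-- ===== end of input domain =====

-- B replaces A's Counter-and-max by sort-and-scan: all valid n-grams are flattened into one list,
-- sorted, and a single run-length pass over the sorted list computes each run's count and keeps the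
-- running best (count, gram) pair among runs of count >= 2 (objective: alternative, not claimed faster).

-- ===== PORT A =====
def find_all_ngrams (lines : List (List Int)) (N : Int) (cost : Int) : Option (List Int) × Int :=
  let ctr : PySem.Dict (List Int) Int :=
    lines.foldl (fun ctr line =>
      (PySem.List.pyRange 0 ((line.length : Int) - N + 1) 1).foldl (fun ctr i =>
        if PySem.List.pyGetD line i 0 ≠ PySem.List.pyGetD line (i + 1) 0 then
          ctr.modify (PySem.List.slice line (some i) (some (i + N))) 0 (· + 1)
        else ctr) ctr) PySem.Dict.empty
  let r : List (Int × List Int) :=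
    (ctr.items.filter (fun p => 2 ≤ p.2)).map (fun p => (p.2, p.1))
  if r.length = 0 then (none, 0)
  else
    match PySem.List.max2? r (fun p => p.1) (fun p => p.2) with
    | none => (none, 0)   -- unreachable: r is nonempty here
    | some ba => (some ba.2, (N - cost) * ba.1 - N - 2)

-- ===== PORT B =====
-- Source B's while-loop over the sorted gram list: each outer iteration consumes one run
-- (the inner 'while grams[k] == grams[j]' is the takeWhile/dropWhile split) and updates best.
def pvRunScan : List (List Int) → Option (Int × List Int) → Option (Int × List Int)
  | [], best => best
  | g :: t, best =>
    let run := t.takeWhile (fun x => x == g)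
    let rest := t.dropWhile (fun x => x == g)
    let c : Int := 1 + (run.length : Int)
    let best' := match best with
      | none => if 2 ≤ c then some (c, g) else best
      | some b => if 2 ≤ c ∧ (b.1 < c ∨ (b.1 = c ∧ b.2 < g)) then some (c, g) else best
    pvRunScan rest best'
termination_by l _ => l.length
decreasing_by
  simp only [List.length_cons]
  exact Nat.lt_succ_of_le (List.length_dropWhile_le _ _)

def find_all_ngrams_alt (lines : List (List Int)) (N : Int) (cost : Int) : Option (List Int) × Int :=
  let grams : List (List Int) :=
    PySem.List.sorted
      (lines.flatMap (fun line =>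
        ((PySem.List.pyRange 0 ((line.length : Int) - N + 1) 1).filter (fun i =>
            PySem.List.pyGetD line i 0 ≠ PySem.List.pyGetD line (i + 1) 0)).map (fun i =>
            PySem.List.slice line (some i) (some (i + N)))))
      (fun g => g) false
  match pvRunScan grams none with
  | none => (none, 0)
  | some cg => (some cg.2, (N - cost) * cg.1 - N - 2)

-- ===== PRECONDITION & SPEC =====
-- Pre_ excludes exactly the inputs on which Python A (and B alike) raises IndexError: when N ≤ 1 and
-- some line is long enough for the index loop to run, line[i+1] (or line[i]) is read out of range.
def Pre_find_all_ngrams (lines : List (List Int)) (N : Int) (cost : Int) : Prop :=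
  2 ≤ N ∨ ∀ line ∈ lines, (line.length : Int) ≤ N - 1
instance (lines : List (List Int)) (N : Int) (cost : Int) : Decidable (Pre_find_all_ngrams lines N cost) := by unfold Pre_find_all_ngrams; infer_instance
def pvWitness_find_all_ngrams : List (List Int) × Int × Int := ([[1, 2, 1, 2]], 2, 1)
def Spec_find_all_ngrams (lines : List (List Int)) (N : Int) (cost : Int) (out : Option (List Int) × Int) : Prop := out = find_all_ngrams_alt lines N cost
instance (lines : List (List Int)) (N : Int) (cost : Int) (out : Option (List Int) × Int) : Decidable (Spec_find_all_ngrams lines N cost out) := by unfold Spec_find_all_ngrams; infer_instance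

-- ===== CLAIM (what is proved, stated in full; the proofs are below) =====
def Claim_equal_find_all_ngrams : Prop := ∀ (lines : List (List Int)) (N : Int) (cost : Int), Dom_find_all_ngrams lines N cost → Pre_find_all_ngrams lines N cost → Spec_find_all_ngrams lines N cost (find_all_ngrams lines N cost)

-- ===== LEMMAS AND PROOFS =====

-- the list of valid n-grams contributed by one line, and by all lines (proof-side names)
def pvGramsOf (N : Int) (line : List Int) : List (List Int) :=
  ((PySem.List.pyRange 0 ((line.length : Int) - N + 1) 1).filter (fun i =>
      PySem.List.pyGetD line i 0 ≠ PySem.List.pyGetD line (i + 1) 0)).map (fun i =>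
      PySem.List.slice line (some i) (some (i + N)))

def pvGrams (lines : List (List Int)) (N : Int) : List (List Int) := lines.flatMap (pvGramsOf N)

-- one step of the running lexicographic maximum over (count, gram) pairs
def pvPstep (b : Option (Int × List Int)) (p : Int × List Int) : Option (Int × List Int) :=
  match b with
  | none => some p
  | some m => if m.1 < p.1 ∨ (m.1 = p.1 ∧ m.2 < p.2) then some p else some m

def pvBestFold (c : List Int → Int) (l : List (List Int)) : Option (Int × List Int) :=
  l.foldl (fun b g => pvPstep b (c g, g)) none

-- the first element of each run of the scanned list
def pvHeads : List (List Int) → List (List Int)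
  | [] => []
  | g :: t => g :: pvHeads (t.dropWhile (fun x => x == g))
termination_by l => l.length
decreasing_by
  simp only [List.length_cons]
  exact Nat.lt_succ_of_le (List.length_dropWhile_le _ _)

lemma pvPstep_some (m p : Int × List Int) :
    pvPstep (some m) p = some (ofLex (max (toLex m) (toLex p))) := by
  show (if m.1 < p.1 ∨ (m.1 = p.1 ∧ m.2 < p.2) then some p else some m)
      = some (ofLex (max (toLex m) (toLex p)))
  by_cases h : m.1 < p.1 ∨ (m.1 = p.1 ∧ m.2 < p.2)
  · rw [if_pos h]
    have hlt : toLex m < toLex p := Prod.Lex.toLex_lt_toLex.mpr h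
    simp [max_eq_right hlt.le]
  · rw [if_neg h]
    have hnlt : ¬ toLex m < toLex p := fun hc => h (Prod.Lex.toLex_lt_toLex.mp hc)
    simp [max_eq_left (le_of_not_gt hnlt)]

lemma pvPstep_comm (b : Option (Int × List Int)) (p q : Int × List Int) :
    pvPstep (pvPstep b p) q = pvPstep (pvPstep b q) p := by
  cases b with
  | none =>
    show pvPstep (some p) q = pvPstep (some q) p
    rw [pvPstep_some, pvPstep_some, max_comm]
  | some m =>
    rw [pvPstep_some, pvPstep_some, pvPstep_some, pvPstep_some]
    simp [max_right_comm]

lemma pvBestFold_perm (c : List Int → Int) {l₁ l₂ : List (List Int)} (h : l₁.Perm l₂) :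
    pvBestFold c l₁ = pvBestFold c l₂ :=
  List.Perm.foldl_eq' h (fun x _ y _ z => pvPstep_comm z (c x, x) (c y, y)) none

lemma pvFoldl_isSome (c : List Int → Int) :
    ∀ (l : List (List Int)) (m : Int × List Int),
      (l.foldl (fun b g => pvPstep b (c g, g)) (some m)).isSome := by
  intro l
  induction l with
  | nil => intro m; rfl
  | cons g t ih =>
    intro m
    show (t.foldl _ (pvPstep (some m) (c g, g))).isSome
    rw [pvPstep_some]
    exact ih _

lemma pvBestFold_eq_none_iff (c : List Int → Int) (l : List (List Int)) :
    pvBestFold c l = none ↔ l = [] := by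
  cases l with
  | nil => simp [pvBestFold]
  | cons g t =>
    simp only [pvBestFold, List.foldl_cons]
    constructor
    · intro h
      have := pvFoldl_isSome c t (c g, g)
      rw [show pvPstep none (c g, g) = some (c g, g) from rfl] at h
      rw [h] at this; cases this
    · intro h; cases h

-- A's Counter loop builds exactly Counter(pvGrams lines N)
lemma pv_ctr_eq (lines : List (List Int)) (N : Int) :
    lines.foldl (fun ctr line =>
      (PySem.List.pyRange 0 ((line.length : Int) - N + 1) 1).foldl (fun ctr i =>
        if PySem.List.pyGetD line i 0 ≠ PySem.List.pyGetD line (i + 1) 0 then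
          ctr.modify (PySem.List.slice line (some i) (some (i + N))) 0 (· + 1)
        else ctr) ctr) PySem.Dict.empty
    = PySem.Dict.counter (pvGrams lines N) := by
  rw [PySem.Dict.counter_eq_foldl, pvGrams, List.foldl_flatMap]
  congr 1
  funext d line
  rw [PySem.List.foldl_ite_eq_foldl_filter, pvGramsOf, List.foldl_map]

-- A's max2? over the swapped filtered items is the running lexicographic best
lemma pv_max2_eq (c : List Int → Int) (kl : List (List Int)) :
    PySem.List.max2? (kl.map (fun k => (c k, k))) (fun p => p.1) (fun p => p.2)
    = pvBestFold c kl := by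
  unfold PySem.List.max2? pvBestFold
  rw [List.foldl_map]
  congr 1
  funext b k
  cases b with
  | none => rfl
  | some m =>
    show (if (decide (m.1 < c k) || (!decide (c k < m.1) && decide (m.2 < k))) = true
          then some (c k, k) else some m) = pvPstep (some m) (c k, k)
    unfold pvPstep
    have hiff : (m.1 < c k ∨ (¬ c k < m.1 ∧ m.2 < k)) ↔ (m.1 < c k ∨ (m.1 = c k ∧ m.2 < k)) := by
      constructor
      · rintro (h | ⟨h1, h2⟩)
        · exact Or.inl h
        · rcases lt_or_eq_of_le (not_lt.mp h1) with h' | h'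
          · exact Or.inl h'
          · exact Or.inr ⟨h', h2⟩
      · rintro (h | ⟨h1, h2⟩)
        · exact Or.inl h
        · exact Or.inr ⟨by rw [h1]; exact lt_irrefl _, h2⟩
    simp only [Bool.or_eq_true, Bool.and_eq_true, Bool.not_eq_true', decide_eq_true_eq,
      decide_eq_false_iff_not]
    rw [if_congr hiff rfl rfl]

lemma pv_A_eq (lines : List (List Int)) (N : Int) (cost : Int) :
    find_all_ngrams lines N cost =
      match pvBestFold (fun g => ((pvGrams lines N).count g : Int))
          ((PySem.Set.ofList (pvGrams lines N)).filter
            (fun g => decide (2 ≤ ((pvGrams lines N).count g : Int)))) with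
      | none => (none, 0)
      | some ba => (some ba.2, (N - cost) * ba.1 - N - 2) := by
  simp only [find_all_ngrams]
  rw [pv_ctr_eq, PySem.Dict.items_counter, List.filter_map, List.map_map]
  set c : List Int → Int := fun g => ((pvGrams lines N).count g : Int) with hc
  have hcomp2 : ((fun (p : List Int × Int) => (p.2, p.1)) ∘
      (fun k => (k, ((pvGrams lines N).count k : Int)))) = fun k => (c k, k) := by
    funext k; rfl
  have hcomp1 : ((fun (p : List Int × Int) => decide (2 ≤ p.2)) ∘
      (fun k => (k, ((pvGrams lines N).count k : Int)))) = fun k => decide (2 ≤ c k) := by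
    funext k; rfl
  rw [hcomp1, hcomp2]
  set kl := (PySem.Set.ofList (pvGrams lines N)).filter (fun g => decide (2 ≤ c g)) with hkl
  rw [pv_max2_eq c kl]
  cases hbest : pvBestFold c kl with
  | none =>
    have h0 : kl = [] := (pvBestFold_eq_none_iff c kl).mp hbest
    simp [h0]
  | some ba =>
    have hne : kl ≠ [] := by
      intro h
      rw [(pvBestFold_eq_none_iff c kl).mpr h] at hbest
      cases hbest
    have hlen : ¬ (kl.map (fun k => (c k, k))).length = 0 := by
      simpa using fun h => hne (List.eq_nil_of_length_eq_zero h)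
    rw [if_neg hlen]

-- ===== sorted-run facts for the B side =====

lemma pv_dropWhile_gt (g : List Int) :
    ∀ (t : List (List Int)), (∀ x ∈ t, g ≤ x) → t.Pairwise (· ≤ ·) →
      ∀ x ∈ t.dropWhile (fun x => x == g), g < x := by
  intro t
  induction t with
  | nil => intro _ _ x hx; cases hx
  | cons a t' ih =>
    intro hle hpw x hx
    rw [List.dropWhile_cons] at hx
    by_cases ha : (a == g) = true
    · rw [if_pos ha] at hx
      exact ih (fun y hy => hle y (List.mem_cons_of_mem a hy)) hpw.tail x hx
    · rw [if_neg ha] at hx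
      have hga : g < a :=
        lt_of_le_of_ne (hle a List.mem_cons_self) (fun h => ha (by simp [h]))
      rcases List.mem_cons.mp hx with hx | hx
      · exact hx ▸ hga
      · exact lt_of_lt_of_le hga (List.rel_of_pairwise_cons hpw hx)

lemma pv_mem_run_eq (g x : List Int) (t : List (List Int))
    (hx : x ∈ t.takeWhile (fun x => x == g)) : x = g := by
  have := List.mem_takeWhile_imp hx
  simpa using this

lemma pvHeads_subset : ∀ (l : List (List Int)), ∀ x ∈ pvHeads l, x ∈ l := by
  intro l
  induction l using pvHeads.induct with
  | case1 => intro x hx; simp [pvHeads] at hx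
  | case2 g t ih =>
    intro x hx
    rw [pvHeads] at hx
    rcases List.mem_cons.mp hx with hx | hx
    · exact hx ▸ List.mem_cons_self
    · exact List.mem_cons_of_mem g ((List.dropWhile_sublist _).mem (ih x hx))

lemma pvHeads_sorted_facts : ∀ (l : List (List Int)), l.Pairwise (· ≤ ·) →
    (pvHeads l).Nodup ∧ (∀ x ∈ l, x ∈ pvHeads l) := by
  intro l
  induction l using pvHeads.induct with
  | case1 =>
    intro _
    constructor
    · simp [pvHeads]
    · intro x hx; cases hx
  | case2 g t ih =>
    intro hpw
    have hle : ∀ x ∈ t, g ≤ x := fun x hx => List.rel_of_pairwise_cons hpw hx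
    have hrest_pw : (t.dropWhile (fun x => x == g)).Pairwise (· ≤ ·) :=
      hpw.tail.sublist (List.dropWhile_sublist _)
    have hgt := pv_dropWhile_gt g t hle hpw.tail
    obtain ⟨hnd, hmem⟩ := ih hrest_pw
    rw [pvHeads]
    constructor
    · refine List.nodup_cons.mpr ⟨fun hg => ?_, hnd⟩
      exact absurd (hgt g (pvHeads_subset _ g hg)) (lt_irrefl g)
    · intro x hx
      rcases List.mem_cons.mp hx with rfl | hx'
      · exact List.mem_cons_self
      · have hsplit : x ∈ t.takeWhile (fun x => x == g) ++ t.dropWhile (fun x => x == g) := by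
          rw [List.takeWhile_append_dropWhile]; exact hx'
        rcases List.mem_append.mp hsplit with h1 | h2
        · rw [pv_mem_run_eq g x t h1]; exact List.mem_cons_self
        · exact List.mem_cons_of_mem g (hmem x h2)

lemma pv_count_head (g : List Int) (t : List (List Int)) (hpw : (g :: t).Pairwise (· ≤ ·)) :
    (g :: t).count g = (t.takeWhile (fun x => x == g)).length + 1 := by
  have hgt := pv_dropWhile_gt g t (fun x hx => List.rel_of_pairwise_cons hpw hx) hpw.tail
  rw [List.count_cons_self]
  congr 1
  conv_lhs => rw [← List.takeWhile_append_dropWhile (p := fun x => x == g) (l := t)]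
  rw [List.count_append]
  have h1 : (t.takeWhile (fun x => x == g)).count g = (t.takeWhile (fun x => x == g)).length :=
    List.count_eq_length.mpr (fun b hb => by rw [pv_mem_run_eq g b t hb])
  have h2 : (t.dropWhile (fun x => x == g)).count g = 0 :=
    List.count_eq_zero.mpr (fun hg => absurd (hgt g hg) (lt_irrefl g))
  omega

lemma pv_count_rest (g x : List Int) (t : List (List Int)) (hpw : (g :: t).Pairwise (· ≤ ·))
    (hx : x ∈ t.dropWhile (fun x => x == g)) :
    (g :: t).count x = (t.dropWhile (fun x => x == g)).count x := by
  have hgt := pv_dropWhile_gt g t (fun x hx => List.rel_of_pairwise_cons hpw hx) hpw.tail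
  have hxg : x ≠ g := fun h => absurd (h ▸ hgt x hx) (lt_irrefl g)
  have hstep0 : List.count x (g :: t) = List.count x t := by
    simp [Ne.symm hxg]
  rw [hstep0]
  conv_lhs => rw [← List.takeWhile_append_dropWhile (p := fun x => x == g) (l := t)]
  rw [List.count_append]
  have h1 : (t.takeWhile (fun x => x == g)).count x = 0 :=
    List.count_eq_zero.mpr (fun hg => hxg (pv_mem_run_eq g x t hg))
  omega

-- the run-length scan over a sorted list is the conditional best-fold over its run heads
lemma pvRunScan_eq_foldl : ∀ (l : List (List Int)), l.Pairwise (· ≤ ·) → ∀ best,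
    pvRunScan l best = (pvHeads l).foldl
      (fun b g => if 2 ≤ (l.count g : Int) then pvPstep b ((l.count g : Int), g) else b) best := by
  intro l
  induction l using pvHeads.induct with
  | case1 => intro _ best; rw [pvRunScan, pvHeads]; rfl
  | case2 g t ih =>
    intro hpw best
    have hrest_pw : (t.dropWhile (fun x => x == g)).Pairwise (· ≤ ·) :=
      hpw.tail.sublist (List.dropWhile_sublist _)
    rw [pvRunScan.eq_def]
    simp only []
    rw [pvHeads, List.foldl_cons]
    have hcount : ((g :: t).count g : Int) = 1 + ((t.takeWhile (fun x => x == g)).length : Int) := by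
      rw [pv_count_head g t hpw]; push_cast; ring
    have hstep : (match best with
        | none => if 2 ≤ 1 + ((t.takeWhile (fun x => x == g)).length : Int)
            then some (1 + ((t.takeWhile (fun x => x == g)).length : Int), g) else best
        | some b => if 2 ≤ 1 + ((t.takeWhile (fun x => x == g)).length : Int) ∧
              (b.1 < 1 + ((t.takeWhile (fun x => x == g)).length : Int) ∨
               (b.1 = 1 + ((t.takeWhile (fun x => x == g)).length : Int) ∧ b.2 < g))
            then some (1 + ((t.takeWhile (fun x => x == g)).length : Int), g) else best)
        = (if 2 ≤ ((g :: t).count g : Int) then pvPstep best (((g :: t).count g : Int), g) else best) := by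
      rw [hcount]
      set c : Int := 1 + ((t.takeWhile (fun x => x == g)).length : Int) with hcdef
      cases best with
      | none =>
        by_cases h2 : 2 ≤ c
        · simp only [if_pos h2]; rfl
        · simp [h2]
      | some b =>
        by_cases h2 : 2 ≤ c
        · by_cases hb : b.1 < c ∨ (b.1 = c ∧ b.2 < g)
          · simp [pvPstep, h2, hb]
          · simp [pvPstep, h2, hb]
        · simp [pvPstep, h2]
    rw [ih hrest_pw]
    rw [hstep]
    apply PySem.List.foldl_congr_mem'
    intro x hx b
    rw [pv_count_rest g x t hpw (pvHeads_subset _ x hx)]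

lemma pv_B_eq (lines : List (List Int)) (N : Int) (cost : Int) :
    find_all_ngrams_alt lines N cost =
      match pvBestFold (fun g => ((pvGrams lines N).count g : Int))
          ((PySem.Set.ofList (pvGrams lines N)).filter
            (fun g => decide (2 ≤ ((pvGrams lines N).count g : Int)))) with
      | none => (none, 0)
      | some ba => (some ba.2, (N - cost) * ba.1 - N - 2) := by
  simp only [find_all_ngrams_alt]
  rw [show (lines.flatMap (fun line =>
      ((PySem.List.pyRange 0 ((line.length : Int) - N + 1) 1).filter (fun i =>
          PySem.List.pyGetD line i 0 ≠ PySem.List.pyGetD line (i + 1) 0)).map (fun i =>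
          PySem.List.slice line (some i) (some (i + N))))) = pvGrams lines N from rfl]
  set grams := pvGrams lines N with hg
  set s := PySem.List.sorted grams (fun g => g) false with hs
  have hperm : s.Perm grams := PySem.List.sorted_perm grams (fun g => g) false
  have hinst : (fun (a b : List Int) => a.decidableLT b) = (LinearOrder.toDecidableLT (α := List Int)) := by
    funext a b; exact Subsingleton.elim _ _
  have hpw : s.Pairwise (· ≤ ·) := by
    rw [hs, hinst]; exact PySem.List.sorted_pairwise grams (fun g => g)
  have hcount : ∀ x, (s.count x : Int) = (grams.count x : Int) := by
    intro x; exact_mod_cast hperm.count_eq x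
  rw [pvRunScan_eq_foldl s hpw none]
  rw [PySem.List.foldl_ite_eq_foldl_filter]
  have hfold : ((pvHeads s).filter (fun g => decide (2 ≤ (s.count g : Int)))).foldl
        (fun b g => pvPstep b ((s.count g : Int), g)) none
      = pvBestFold (fun g => ((grams.count g : Int)))
          ((PySem.Set.ofList grams).filter (fun g => decide (2 ≤ (grams.count g : Int)))) := by
    have hf1 : (fun (g : List Int) => decide (2 ≤ (s.count g : Int)))
        = fun g => decide (2 ≤ (grams.count g : Int)) := by
      funext g; rw [hcount]
    have hf2 : (fun (b : Option (Int × List Int)) (g : List Int) => pvPstep b ((s.count g : Int), g))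
        = fun b g => pvPstep b ((grams.count g : Int), g) := by
      funext b g; rw [hcount]
    rw [hf1, hf2]
    have hperm_heads : (pvHeads s).Perm (PySem.Set.ofList grams) := by
      obtain ⟨hnd, hmem⟩ := pvHeads_sorted_facts s hpw
      refine (List.perm_ext_iff_of_nodup hnd (PySem.Set.nodup_ofList grams)).mpr ?_
      intro a
      rw [PySem.Set.mem_ofList]
      constructor
      · intro ha; exact hperm.mem_iff.mp (pvHeads_subset s a ha)
      · intro ha; exact hmem a (hperm.mem_iff.mpr ha)
    exact pvBestFold_perm _ (hperm_heads.filter _)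
  rw [hfold]

-- ===== VERDICT (by name: the statement is the Claim_ definition above) =====
theorem find_all_ngrams_spec : Claim_equal_find_all_ngrams := by
  intro lines N cost _ _
  unfold Spec_find_all_ngrams
  rw [pv_A_eq, pv_B_eq]
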